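-- pv_equiv track=rewrite | github.com/azhaiLisa/lol-ranking-system | eval/eval_single.py | parse_event_roles
-- ===== SOURCE A (Python) =====
-- ROLE_TOKENS = {
--     "[TOP_B]", "[JUNGLE_B]", "[MIDDLE_B]", "[BOTTOM_B]", "[UTILITY_B]",
--     "[TOP_R]", "[JUNGLE_R]", "[MIDDLE_R]", "[BOTTOM_R]", "[UTILITY_R]"
-- }
--
-- SURPRISE_EVENT_HEADS = {
--     "[KILL]", "[ASSIST]",
--     "[SPECIAL_DOUBLE_KILL]", "[SPECIAL_TRIPLE_KILL]", "[SPECIAL_QUADRA_KILL]",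
--     "[SPECIAL_PENTA_KILL]", "[SPECIAL_KILL_ACE]", "[SPECIAL_KILL_FIRST_BLOOD]",
--     "[SKILL_UP]", "[LEVEL_UP]",
--     "[ITEM_BUY]", "[ITEM_SELL]", "[ITEM_USE]", "[ITEM_UNDO]",
--     "[WARD_PLACE]", "[WARD_KILL]",
--     "[BUILDING_DESTROY]", "[BUILDING_PLATE]",
--     "[MONSTER_DRAGON]", "[MONSTER_BARON_NASHOR]", "[MONSTER_RIFTHERALD]",
--     "[MONSTER_HORDE]", "[MONSTER_ATAKHAN]"
-- }
--
-- def parse_event_roles(tokens, start_idx):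
--     roles = []
--     i = start_idx + 1
--     while i < len(tokens):
--         t = tokens[i]
--         if t.startswith("[") and (t in SURPRISE_EVENT_HEADS or t.startswith("[FRAME") or t.startswith("[GAME_")):
--             break
--         if t in ROLE_TOKENS:
--             roles.append((i, t))
--         i += 1
--     return roles
-- ===== SOURCE B (Python) =====
-- ROLE_TOKENS = {
--     "[TOP_B]", "[JUNGLE_B]", "[MIDDLE_B]", "[BOTTOM_B]", "[UTILITY_B]",
--     "[TOP_R]", "[JUNGLE_R]", "[MIDDLE_R]", "[BOTTOM_R]", "[UTILITY_R]"
-- }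
--
-- SURPRISE_EVENT_HEADS = {
--     "[KILL]", "[ASSIST]",
--     "[SPECIAL_DOUBLE_KILL]", "[SPECIAL_TRIPLE_KILL]", "[SPECIAL_QUADRA_KILL]",
--     "[SPECIAL_PENTA_KILL]", "[SPECIAL_KILL_ACE]", "[SPECIAL_KILL_FIRST_BLOOD]",
--     "[SKILL_UP]", "[LEVEL_UP]",
--     "[ITEM_BUY]", "[ITEM_SELL]", "[ITEM_USE]", "[ITEM_UNDO]",
--     "[WARD_PLACE]", "[WARD_KILL]",
--     "[BUILDING_DESTROY]", "[BUILDING_PLATE]",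
--     "[MONSTER_DRAGON]", "[MONSTER_BARON_NASHOR]", "[MONSTER_RIFTHERALD]",
--     "[MONSTER_HORDE]", "[MONSTER_ATAKHAN]"
-- }
--
--
-- def _is_event_head(t):
--     return t.startswith("[") and (
--         t in SURPRISE_EVENT_HEADS or t.startswith("[FRAME") or t.startswith("[GAME_")
--     )
--
--
-- def parse_event_roles(tokens, start_idx):
--     lo = start_idx + 1
--     stop = next((j for j in range(lo, len(tokens)) if _is_event_head(tokens[j])),
--                 len(tokens))
--     return [(j, tokens[j]) for j in range(lo, stop) if tokens[j] in ROLE_TOKENS]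
-- ===== Notes on version B (the rewrite author's own statement) =====
-- stated objective: simpler
-- what changed: Replaced the single interleaved break-and-append while-loop by a two-pass decomposition: first find the stopping boundary (first event-head token after start_idx) with next() over a generator, then build the result as a list comprehension filtering role tokens up to that boundary.
import Mathlib
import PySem

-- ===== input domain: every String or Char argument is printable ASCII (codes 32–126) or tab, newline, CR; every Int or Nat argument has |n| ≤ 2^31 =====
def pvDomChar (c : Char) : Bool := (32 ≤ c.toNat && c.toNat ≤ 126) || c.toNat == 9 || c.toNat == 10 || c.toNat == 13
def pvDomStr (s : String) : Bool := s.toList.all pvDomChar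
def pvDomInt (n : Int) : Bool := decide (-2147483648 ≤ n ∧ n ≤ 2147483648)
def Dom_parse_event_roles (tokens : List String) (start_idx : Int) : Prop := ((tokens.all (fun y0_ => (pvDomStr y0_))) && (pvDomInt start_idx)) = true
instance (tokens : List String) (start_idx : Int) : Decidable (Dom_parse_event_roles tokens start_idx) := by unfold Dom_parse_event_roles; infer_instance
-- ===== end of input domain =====

-- B replaces A's interleaved break-and-append loop by boundary-search-then-filter (objective: simpler decomposition).

def ROLE_TOKENS : List String :=
  ["[TOP_B]", "[JUNGLE_B]", "[MIDDLE_B]", "[BOTTOM_B]", "[UTILITY_B]",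
   "[TOP_R]", "[JUNGLE_R]", "[MIDDLE_R]", "[BOTTOM_R]", "[UTILITY_R]"]

def SURPRISE_EVENT_HEADS : List String :=
  ["[KILL]", "[ASSIST]",
   "[SPECIAL_DOUBLE_KILL]", "[SPECIAL_TRIPLE_KILL]", "[SPECIAL_QUADRA_KILL]",
   "[SPECIAL_PENTA_KILL]", "[SPECIAL_KILL_ACE]", "[SPECIAL_KILL_FIRST_BLOOD]",
   "[SKILL_UP]", "[LEVEL_UP]",
   "[ITEM_BUY]", "[ITEM_SELL]", "[ITEM_USE]", "[ITEM_UNDO]",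
   "[WARD_PLACE]", "[WARD_KILL]",
   "[BUILDING_DESTROY]", "[BUILDING_PLATE]",
   "[MONSTER_DRAGON]", "[MONSTER_BARON_NASHOR]", "[MONSTER_RIFTHERALD]",
   "[MONSTER_HORDE]", "[MONSTER_ATAKHAN]"]

-- ===== PORT A =====
-- A's while-loop: break on event head, append role tokens, i += 1.
def parseLoopA (tokens : List String) (i : Int) (acc : List (Int × String)) :
    List (Int × String) :=
  if _h : i < (tokens.length : Int) then
    match PySem.List.pyGet? tokens i with
    | none => acc   -- Python raises IndexError here; excluded by Pre_
    | some t =>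
      if PySem.Str.startswith t "[" &&
         (SURPRISE_EVENT_HEADS.contains t || PySem.Str.startswith t "[FRAME" ||
          PySem.Str.startswith t "[GAME_") then
        acc
      else
        parseLoopA tokens (i + 1)
          (if ROLE_TOKENS.contains t then acc ++ [(i, t)] else acc)
  else acc
termination_by ((tokens.length : Int) - i).toNat
decreasing_by omega

def parse_event_roles (tokens : List String) (start_idx : Int) : List (Int × String) :=
  parseLoopA tokens (start_idx + 1) []

-- ===== PORT B =====
def isEventHead (t : String) : Bool :=
  PySem.Str.startswith t "[" &&
  (SURPRISE_EVENT_HEADS.contains t || PySem.Str.startswith t "[FRAME" ||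
   PySem.Str.startswith t "[GAME_")

-- next((j for j in range(lo, len(tokens)) if _is_event_head(tokens[j])), len(tokens))
def findStop (tokens : List String) (j : Int) : Int :=
  if _h : j < (tokens.length : Int) then
    match PySem.List.pyGet? tokens j with
    | none => (tokens.length : Int)   -- Python raises IndexError here; excluded by Pre_
    | some t => if isEventHead t then j else findStop tokens (j + 1)
  else (tokens.length : Int)
termination_by ((tokens.length : Int) - j).toNat
decreasing_by omega

def parse_event_roles_alt (tokens : List String) (start_idx : Int) : List (Int × String) :=
  let lo := start_idx + 1
  let stop := findStop tokens lo
  (PySem.List.pyRange lo stop 1).filterMap (fun j =>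
    match PySem.List.pyGet? tokens j with
    | some t => if ROLE_TOKENS.contains t then some (j, t) else none
    | none => none)

-- ===== PRECONDITION & SPEC =====
-- Pre_ excludes exactly the inputs where A raises IndexError: start_idx + 1 < -len(tokens)
-- makes the first subscript tokens[start_idx+1] out of range even after negative wraparound.
def Pre_parse_event_roles (tokens : List String) (start_idx : Int) : Prop :=
  -(tokens.length : Int) ≤ start_idx + 1
instance (tokens : List String) (start_idx : Int) : Decidable (Pre_parse_event_roles tokens start_idx) := by unfold Pre_parse_event_roles; infer_instance

def pvWitness_parse_event_roles : List String × Int :=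
  (["[KILL_X]", "[TOP_B]", "w", "[JUNGLE_R]", "[KILL]", "[BOTTOM_B]"], 0)

def Spec_parse_event_roles (tokens : List String) (start_idx : Int) (out : List (Int × String)) : Prop := out = parse_event_roles_alt tokens start_idx
instance (tokens : List String) (start_idx : Int) (out : List (Int × String)) : Decidable (Spec_parse_event_roles tokens start_idx out) := by unfold Spec_parse_event_roles; infer_instance

-- ===== CLAIM (what is proved, stated in full; the proofs are below) =====
def Claim_equal_parse_event_roles : Prop := ∀ (tokens : List String) (start_idx : Int), Dom_parse_event_roles tokens start_idx → Pre_parse_event_roles tokens start_idx → Spec_parse_event_roles tokens start_idx (parse_event_roles tokens start_idx)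

-- ===== LEMMAS AND PROOFS =====

theorem findStop_lower (tokens : List String) (j : Int) :
    min j (tokens.length : Int) ≤ findStop tokens j ∧ findStop tokens j ≤ (tokens.length : Int) := by
  unfold findStop
  split
  · rename_i h
    cases hg : PySem.List.pyGet? tokens j with
    | none => dsimp only; omega
    | some t =>
      dsimp only
      split
      · omega
      · have := findStop_lower tokens (j + 1)
        omega
  · rename_i h
    omega
termination_by ((tokens.length : Int) - j).toNat
decreasing_by omega

theorem loop_eq_filter (tokens : List String) (i : Int) (acc : List (Int × String))
    (hpre : -(tokens.length : Int) ≤ i) :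
    parseLoopA tokens i acc =
      acc ++ (PySem.List.pyRange i (findStop tokens i) 1).filterMap (fun j =>
        match PySem.List.pyGet? tokens j with
        | some t => if ROLE_TOKENS.contains t then some (j, t) else none
        | none => none) := by
  rw [parseLoopA, findStop]
  split
  · rename_i h
    have hin : PySem.Raise.InRange tokens.length i := by
      unfold PySem.Raise.InRange; omega
    cases hg : PySem.List.pyGet? tokens i with
    | none =>
      exact absurd ((PySem.List.pyGet?_eq_none_iff tokens i).mp hg) (not_not_intro hin)
    | some t =>
      dsimp only
      by_cases hhead : (PySem.Str.startswith t "[" &&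
          (SURPRISE_EVENT_HEADS.contains t || PySem.Str.startswith t "[FRAME" ||
           PySem.Str.startswith t "[GAME_")) = true
      · have hE : isEventHead t = true := hhead
        rw [if_pos hhead]
        simp [hE, PySem.List.pyRange_one_eq_nil (le_refl i)]
      · have hE : isEventHead t = false := by
          exact Bool.not_eq_true _ ▸ Bool.of_not_eq_true hhead
        have hlt : i < findStop tokens (i + 1) := by
          have := findStop_lower tokens (i + 1); omega
        rw [if_neg hhead]
        simp only [hE, Bool.false_eq_true, if_false]
        rw [loop_eq_filter tokens (i + 1) _ (by omega)]
        rw [PySem.List.pyRange_one_cons hlt, List.filterMap_cons, hg]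
        by_cases hrole : t ∈ ROLE_TOKENS
        · simp [hrole]
        · simp [hrole]
  · rename_i h
    rw [PySem.List.pyRange_one_eq_nil (by omega)]
    simp
termination_by ((tokens.length : Int) - i).toNat
decreasing_by omega

-- ===== VERDICT (by name: the statement is the Claim_ definition above) =====
theorem parse_event_roles_spec : Claim_equal_parse_event_roles := by
  intro tokens start_idx _hdom hpre
  unfold Spec_parse_event_roles parse_event_roles parse_event_roles_alt
  rw [loop_eq_filter tokens (start_idx + 1) [] hpre]
  simp
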